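-- pv_equiv track=rewrite | github.com/TomSB1423/Coding-Practice | misc/NumberSolitaire.py | solution
-- ===== SOURCE A (Python) =====
-- def solution(A):
--     dp = [0] * 6
--     dp[-1] = A[0]
--     for i in range(1, len(A)):
--         max_val = float("-inf")
--         for j in range(1, 7):
--             if i-j >= 0:
--                 max_val = max(max_val, dp[-j] + A[i])
--         dp.append(max_val)
--         dp.pop(0)
--     return dp[-1]
-- ===== SOURCE B (Python) =====
-- def solution(A):
--     # max-plus (tropical) algebra: None is -infinity; each step is a 6x6 matrix,
--     # the answer is the start vector applied to the product of all step matrices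
--     def tdot(v, w):
--         best = None
--         for x, y in zip(v, w):
--             if x is None or y is None:
--                 continue
--             s = x + y
--             if best is None or s > best:
--                 best = s
--         return best
--
--     def matmul(P, Q):
--         cols = [[q[c] for q in Q] for c in range(6)]
--         return [[tdot(row, col) for col in cols] for row in P]
--
--     def vecmat(v, P):
--         return [tdot(v, [p[c] for p in P]) for c in range(6)]
--
--     def step(a):
--         # one cell right: w'[c] = w[c+1] for c < 5, w'[5] = max_r w[r] + a
--         return [[a if c == 5 else (0 if c + 1 == r else None) for c in range(6)]
--                 for r in range(6)]
--
--     ident = [[0 if r == c else None for c in range(6)] for r in range(6)]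
--     P = ident
--     for a in A[1:]:
--         P = matmul(P, step(a))
--     start = [None] * 5 + [A[0]]
--     return vecmat(start, P)[5]
-- ===== Notes on version B (the rewrite author's own statement) =====
-- stated objective: alternative
-- what changed: Recasts the sliding-window DP as linear algebra over the max-plus (tropical) semiring: each array element becomes a 6x6 step matrix, the matrices are multiplied together left to right starting from the identity matrix, and the answer is read off by applying the start vector to the accumulated matrix product.
import Mathlib
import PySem

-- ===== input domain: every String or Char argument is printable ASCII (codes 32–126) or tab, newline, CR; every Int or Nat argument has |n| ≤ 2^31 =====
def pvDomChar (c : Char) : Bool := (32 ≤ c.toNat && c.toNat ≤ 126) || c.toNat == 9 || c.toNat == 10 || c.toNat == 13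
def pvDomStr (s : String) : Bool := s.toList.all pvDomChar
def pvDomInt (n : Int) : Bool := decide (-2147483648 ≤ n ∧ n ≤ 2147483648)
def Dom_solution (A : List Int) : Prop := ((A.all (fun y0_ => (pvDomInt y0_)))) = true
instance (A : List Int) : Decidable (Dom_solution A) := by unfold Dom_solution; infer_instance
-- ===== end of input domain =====

-- B replaces A's sliding-window DP pass by max-plus (tropical) linear algebra: each element
-- becomes a 6x6 step matrix, the matrices are multiplied up left to right from the identity,
-- and the answer is the start vector applied to the product (objective: alternative).

-- ===== PORT A =====
-- Python's running max started at float("-inf"): `none` models -inf, one max step produces `some`.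
def omax (acc : Option Int) (v : Int) : Option Int :=
  some (match acc with | none => v | some m => max m v)

def solution (A : List Int) : Int :=
  -- dp = [0] * 6; dp[-1] = A[0]   (A[0] raises IndexError on empty A; excluded by Pre_solution)
  let dp0 : List Int := [0, 0, 0, 0, 0, (PySem.List.pyGet? A 0).getD 0]
  -- for i in range(1, len(A)): ...
  let dp := (List.range' 1 (A.length - 1)).foldl (fun dp (i : ℕ) =>
    -- for j in range(1, 7): if i-j >= 0: max_val = max(max_val, dp[-j] + A[i])
    let maxVal : Option Int := (List.range' 1 6).foldl (fun acc (j : ℕ) =>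
      if (i : Int) - (j : Int) ≥ 0 then
        omax acc ((PySem.List.pyGet? dp (-(j : Int))).getD 0 + (PySem.List.pyGet? A (i : Int)).getD 0)
      else acc) none
    -- dp.append(max_val); dp.pop(0)   (for i ≥ 1, j = 1 always qualifies, so max_val is `some`
    -- and the `.getD 0` below never supplies its default; dp indices -j are in range: |dp| = 6)
    (dp ++ [maxVal.getD 0]).drop 1) dp0
  (PySem.List.pyGet? dp (-1)).getD 0

-- ===== PORT B =====
-- def tdot(v, w): best = None; for x, y in zip(v, w): skip None pairs, keep the larger sum
def tdot (v w : List (Option Int)) : Option Int :=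
  (v.zip w).foldl (fun best p =>
    match p.1, p.2 with
    | some x, some y =>
      let s := x + y
      match best with
      | none => some s
      | some b => if s > b then some s else some b
    | _, _ => best) none

-- the column [q[c] for q in Q] (c < 6 and every row has 6 entries wherever this is used)
def tcol (Q : List (List (Option Int))) (c : ℕ) : List (Option Int) :=
  Q.map (fun q => q.getD c none)

def matmul (P Q : List (List (Option Int))) : List (List (Option Int)) :=
  let cols := (List.range 6).map (fun c => tcol Q c)
  P.map (fun row => cols.map (fun col => tdot row col))

def vecmat (v : List (Option Int)) (P : List (List (Option Int))) : List (Option Int) :=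
  (List.range 6).map (fun c => tdot v (tcol P c))

-- moving the 6-window one cell right: w'[c] = w[c+1] for c < 5, w'[5] = max_r w[r] + a
-- (python's c == r - 1 over ints is c + 1 == r)
def stepMat (a : Int) : List (List (Option Int)) :=
  (List.range 6).map (fun r => (List.range 6).map (fun c =>
    if c = 5 then some a else if c + 1 = r then some 0 else none))

def identMat : List (List (Option Int)) :=
  (List.range 6).map (fun r => (List.range 6).map (fun c =>
    if r = c then some 0 else none))

def solution_alt (A : List Int) : Int :=
  -- P = ident; for a in A[1:]: P = matmul(P, step(a))
  let P := (A.drop 1).foldl (fun P a => matmul P (stepMat a)) identMat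
  -- start = [None] * 5 + [A[0]]   (A[0] raises IndexError on empty A; excluded by Pre_solution)
  let start : List (Option Int) := [none, none, none, none, none,
    some ((PySem.List.pyGet? A 0).getD 0)]
  -- return vecmat(start, P)[5]   (index 5 of a 6-list; the entry is always `some` for
  -- nonempty A — every index is reachable by unit steps — so `.getD 0` never supplies its default)
  ((vecmat start P).getD 5 none).getD 0

-- ===== PRECONDITION & SPEC =====
-- Pre_ excludes only the empty list, on which the Python A raises IndexError at `A[0]`.
def Pre_solution (A : List Int) : Prop := A ≠ []
instance (A : List Int) : Decidable (Pre_solution A) := by unfold Pre_solution; infer_instance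
def pvWitness_solution : List Int := [3, -2, 4]

def Spec_solution (A : List Int) (out : Int) : Prop := out = solution_alt A
instance (A : List Int) (out : Int) : Decidable (Spec_solution A out) := by unfold Spec_solution; infer_instance

-- ===== CLAIM (what is proved, stated in full; the proofs are below) =====
def Claim_equal_solution : Prop := ∀ (A : List Int), Dom_solution A → Pre_solution A → Spec_solution A (solution A)

-- ===== LEMMAS AND PROOFS =====

-- the common specification both programs compute: best score reaching index k
-- (max over the up-to-six predecessors, written as A's guarded descending chain)
def best (A : List Int) : ℕ → Int
  | 0 => A.getD 0 0
  | k + 1 =>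
    let w := A.getD (k + 1) 0
    let a1 : Option Int := if (k : Int) + 1 - 1 ≥ 0 then omax none (best A (k + 1 - 1) + w) else none
    let a2 := if (k : Int) + 1 - 2 ≥ 0 then omax a1 (best A (k + 1 - 2) + w) else a1
    let a3 := if (k : Int) + 1 - 3 ≥ 0 then omax a2 (best A (k + 1 - 3) + w) else a2
    let a4 := if (k : Int) + 1 - 4 ≥ 0 then omax a3 (best A (k + 1 - 4) + w) else a3
    let a5 := if (k : Int) + 1 - 5 ≥ 0 then omax a4 (best A (k + 1 - 5) + w) else a4
    let a6 := if (k : Int) + 1 - 6 ≥ 0 then omax a5 (best A (k + 1 - 6) + w) else a5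
    a6.getD 0
termination_by k => k
decreasing_by all_goals omega

-- window padding for A's 6-slot state: entry at "virtual index" m
def gp (A : List Int) (m : ℤ) : Int := if m < 0 then 0 else best A m.toNat

-- B's window padding: `none` (-inf) instead of A's guarded 0
def ow (A : List Int) (m : ℤ) : Option Int := if m < 0 then none else some (best A m.toNat)

-- canonical 6-vector / 6x6-matrix builders (proof-only views of B's lists)
def vOf (g : ℕ → Option Int) : List (Option Int) := (List.range 6).map g

def mOf (f : ℕ → ℕ → Option Int) : List (List (Option Int)) :=
  (List.range 6).map (fun r => (List.range 6).map (f r))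

-- B's window after t processed steps, as a function of the slot index
def W (A : List Int) (t : ℕ) (k : ℕ) : Option Int := ow A ((t : ℤ) - 5 + k)

-- max-plus (tropical) scalar operations, proof-side views of tdot's inner step
def tadd (x y : Option Int) : Option Int :=
  match x, y with
  | some a, some b => some (a + b)
  | _, _ => none

def tmax (x y : Option Int) : Option Int :=
  match x with
  | none => y
  | some a => match y with
    | none => some a
    | some b => some (if a ≥ b then a else b)

-- tropical sum of a list
def tsumL (l : List (Option Int)) : Option Int := l.foldl tmax none


-- ---- A-side lemmas (characterising A's rolling-window pass as `best`) ----

theorem gp_nonneg (A : List Int) (m : ℤ) (h : 0 ≤ m) : gp A m = best A m.toNat := by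
  simp [gp, not_lt.mpr h]

theorem omax_some_getD (a : Option Int) (v : Int) : some ((omax a v).getD 0) = omax a v := by
  cases a <;> rfl

theorem pyGet6_1 (a b c d e f : Int) : (PySem.List.pyGet? [a,b,c,d,e,f] (-1)).getD 0 = f := by
  simp [PySem.List.pyGet?, PySem.List.pyIdx?]

theorem pyGet6_2 (a b c d e f : Int) : (PySem.List.pyGet? [a,b,c,d,e,f] (-2)).getD 0 = e := by
  simp [PySem.List.pyGet?, PySem.List.pyIdx?]

theorem pyGet6_3 (a b c d e f : Int) : (PySem.List.pyGet? [a,b,c,d,e,f] (-3)).getD 0 = d := by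
  simp [PySem.List.pyGet?, PySem.List.pyIdx?]

theorem pyGet6_4 (a b c d e f : Int) : (PySem.List.pyGet? [a,b,c,d,e,f] (-4)).getD 0 = c := by
  simp [PySem.List.pyGet?, PySem.List.pyIdx?]

theorem pyGet6_5 (a b c d e f : Int) : (PySem.List.pyGet? [a,b,c,d,e,f] (-5)).getD 0 = b := by
  simp [PySem.List.pyGet?, PySem.List.pyIdx?]

theorem pyGet6_6 (a b c d e f : Int) : (PySem.List.pyGet? [a,b,c,d,e,f] (-6)).getD 0 = a := by
  simp [PySem.List.pyGet?, PySem.List.pyIdx?]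

theorem A_inner (A : List Int) (t : ℕ) :
    (List.range' 1 6).foldl (fun acc (j : ℕ) =>
      if ((1 + t : ℕ) : Int) - (j : Int) ≥ 0 then
        omax acc ((PySem.List.pyGet? [gp A ((t:ℤ)-5), gp A ((t:ℤ)-4), gp A ((t:ℤ)-3),
                                      gp A ((t:ℤ)-2), gp A ((t:ℤ)-1), gp A (t:ℤ)] (-(j : Int))).getD 0
                  + (PySem.List.pyGet? A ((1 + t : ℕ) : Int)).getD 0)
      else acc) none = some (best A (t + 1)) := by
  have hA : ∀ (z : ℤ), z = ((1 + t : ℕ) : Int) → (PySem.List.pyGet? A z).getD 0 = A.getD (t + 1) 0 := by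
    intro z hz
    rw [hz, show ((1 + t : ℕ) : Int) = ((t + 1 : ℕ) : Int) from by push_cast; ring,
        PySem.List.pyGet?_natCast]
    simp [List.getD]
  simp only [List.range', hA _ rfl]
  norm_num [pyGet6_1, pyGet6_2, pyGet6_3, pyGet6_4, pyGet6_5, pyGet6_6]
  by_cases ht : 5 ≤ t
  · have g2 : (2:ℤ) ≤ 1 + ↑t := by omega
    have g3 : (3:ℤ) ≤ 1 + ↑t := by omega
    have g4 : (4:ℤ) ≤ 1 + ↑t := by omega
    have g5 : (5:ℤ) ≤ 1 + ↑t := by omega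
    have g6 : (6:ℤ) ≤ 1 + ↑t := by omega
    simp only [if_pos g2, if_pos g3, if_pos g4, if_pos g5, if_pos g6]
    rw [best]
    have h1 : ((t:ℤ) + 1 - 1 ≥ 0) := by omega
    have h2 : ((t:ℤ) + 1 - 2 ≥ 0) := by omega
    have h3 : ((t:ℤ) + 1 - 3 ≥ 0) := by omega
    have h4 : ((t:ℤ) + 1 - 4 ≥ 0) := by omega
    have h5 : ((t:ℤ) + 1 - 5 ≥ 0) := by omega
    have h6 : ((t:ℤ) + 1 - 6 ≥ 0) := by omega
    simp only [if_pos h1, if_pos h2, if_pos h3, if_pos h4, if_pos h5, if_pos h6, omax_some_getD]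
    rw [show t + 1 - 1 = t from by omega, show t + 1 - 2 = t - 1 from by omega,
        show t + 1 - 3 = t - 2 from by omega, show t + 1 - 4 = t - 3 from by omega,
        show t + 1 - 5 = t - 4 from by omega, show t + 1 - 6 = t - 5 from by omega]
    rw [show gp A (↑t) = best A t from by rw [gp_nonneg _ _ (by omega)]; norm_num,
        show gp A ((t:ℤ) - 1) = best A (t - 1) from by rw [gp_nonneg _ _ (by omega)]; congr 1; omega,
        show gp A ((t:ℤ) - 2) = best A (t - 2) from by rw [gp_nonneg _ _ (by omega)]; congr 1; omega,
        show gp A ((t:ℤ) - 3) = best A (t - 3) from by rw [gp_nonneg _ _ (by omega)]; congr 1; omega,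
        show gp A ((t:ℤ) - 4) = best A (t - 4) from by rw [gp_nonneg _ _ (by omega)]; congr 1; omega,
        show gp A ((t:ℤ) - 5) = best A (t - 5) from by rw [gp_nonneg _ _ (by omega)]; congr 1; omega]
    simp [List.getD]
  · interval_cases t <;> rw [best] <;> norm_num [gp] <;> rw [omax_some_getD] <;> simp

theorem A_loop (A : List Int) (t : ℕ) :
    (List.range' 1 t).foldl (fun dp (i : ℕ) =>
      let maxVal : Option Int := (List.range' 1 6).foldl (fun acc (j : ℕ) =>
        if (i : Int) - (j : Int) ≥ 0 then
          omax acc ((PySem.List.pyGet? dp (-(j : Int))).getD 0 + (PySem.List.pyGet? A (i : Int)).getD 0)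
        else acc) none
      (dp ++ [maxVal.getD 0]).drop 1) [0, 0, 0, 0, 0, (PySem.List.pyGet? A 0).getD 0]
    = [gp A ((t : ℤ) - 5), gp A ((t : ℤ) - 4), gp A ((t : ℤ) - 3),
       gp A ((t : ℤ) - 2), gp A ((t : ℤ) - 1), gp A (t : ℤ)] := by
  induction t with
  | zero =>
    simp [List.range', gp, best, PySem.List.pyGet?_zero, List.getD]
  | succ t ih =>
    rw [show List.range' 1 (t + 1) = List.range' 1 t ++ [1 + t] from List.range'_1_concat,
        List.foldl_append, ih]
    simp only [List.foldl_cons, List.foldl_nil]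
    rw [A_inner]
    simp only [Option.getD_some, List.cons_append, List.nil_append, List.drop_succ_cons,
      List.drop_zero]
    have e0 : gp A ((↑(t + 1) : ℤ)) = best A (t + 1) := by
      rw [gp_nonneg _ _ (by omega)]; norm_num
    rw [e0,
      show ((↑(t + 1) : ℤ)) - 5 = ↑t - 4 from by push_cast; ring,
      show ((↑(t + 1) : ℤ)) - 4 = ↑t - 3 from by push_cast; ring,
      show ((↑(t + 1) : ℤ)) - 3 = ↑t - 2 from by push_cast; ring,
      show ((↑(t + 1) : ℤ)) - 2 = ↑t - 1 from by push_cast; ring,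
      show ((↑(t + 1) : ℤ)) - 1 = ↑t from by push_cast; ring]

theorem solution_eq_best (A : List Int) :
    solution A = best A (A.length - 1) := by
  unfold solution
  dsimp only
  rw [A_loop, pyGet6_1, gp_nonneg _ _ (by omega)]
  norm_num

-- ---- B-side lemmas: the max-plus algebra ----

theorem tdot_spec (v w : List (Option Int)) :
    tdot v w = (v.zip w).foldl (fun best p => tmax best (tadd p.1 p.2)) none := by
  have gen : ∀ (l : List (Option Int × Option Int)) (acc : Option Int),
      l.foldl (fun best p =>
        match p.1, p.2 with
        | some x, some y =>
          let s := x + y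
          match best with
          | none => some s
          | some b => if s > b then some s else some b
        | _, _ => best) acc
      = l.foldl (fun best p => tmax best (tadd p.1 p.2)) acc := by
    intro l
    induction l with
    | nil => intro acc; rfl
    | cons p l ih =>
      intro acc
      obtain ⟨x, y⟩ := p
      rw [List.foldl_cons, List.foldl_cons, ih]
      congr 1
      cases x <;> cases y <;> cases acc <;>
        first
          | rfl
          | (simp only [tmax, tadd]
             split_ifs <;> (try simp only [Option.some.injEq]) <;> omega)
  exact gen (v.zip w) none

theorem tmax_none_right (x : Option Int) : tmax x none = x := by cases x <;> rfl

theorem tmax_none_left (x : Option Int) : tmax none x = x := rfl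

theorem tmax_assoc (x y z : Option Int) : tmax (tmax x y) z = tmax x (tmax y z) := by
  cases x <;> cases y <;> cases z <;> simp [tmax] <;> split_ifs <;> omega

theorem tmax_comm (x y : Option Int) : tmax x y = tmax y x := by
  cases x <;> cases y <;> simp [tmax] <;> split_ifs <;> omega

theorem tmax_left_comm (x y z : Option Int) : tmax x (tmax y z) = tmax y (tmax x z) := by
  rw [← tmax_assoc, tmax_comm x y, tmax_assoc]

theorem tadd_none_right (x : Option Int) : tadd x none = none := by cases x <;> rfl

theorem tadd_some_zero (x : Option Int) : tadd x (some 0) = x := by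
  cases x <;> simp [tadd]

theorem tadd_tmax (x y z : Option Int) : tadd x (tmax y z) = tmax (tadd x y) (tadd x z) := by
  cases x <;> cases y <;> cases z <;> simp [tadd, tmax] <;> split_ifs <;> omega

theorem tadd_comm (x y : Option Int) : tadd x y = tadd y x := by
  cases x <;> cases y <;> simp [tadd, Int.add_comm]

theorem tsumL_cons (a : Option Int) (l : List (Option Int)) :
    tsumL (a :: l) = tmax a (tsumL l) := by
  have key : ∀ (l : List (Option Int)) (acc : Option Int),
      l.foldl tmax acc = tmax acc (tsumL l) := by
    intro l
    induction l with
    | nil => intro acc; exact (tmax_none_right acc).symm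
    | cons b l ih =>
      intro acc
      rw [List.foldl_cons, ih (tmax acc b), tmax_assoc]
      congr 1
      exact (ih b).symm
  exact key l a

theorem tdot_eq_tsumL (v w : List (Option Int)) :
    tdot v w = tsumL ((v.zip w).map (fun p => tadd p.1 p.2)) := by
  rw [tdot_spec]
  simp only [tsumL, List.foldl_map]

theorem tadd_tsumL (x : Option Int) (l : List (Option Int)) :
    tadd x (tsumL l) = tsumL (l.map (tadd x)) := by
  induction l with
  | nil => simp [tsumL, tadd_none_right]
  | cons a l ih => rw [List.map_cons, tsumL_cons, tsumL_cons, tadd_tmax, ih]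

theorem tsumL_tadd (l : List (Option Int)) (y : Option Int) :
    tadd (tsumL l) y = tsumL (l.map (fun z => tadd z y)) := by
  rw [tadd_comm, tadd_tsumL]
  congr 1
  exact List.map_congr_left (fun z _ => tadd_comm y z)

theorem tsumL_map_tmax {α : Type} (l : List α) (f g : α → Option Int) :
    tsumL (l.map (fun x => tmax (f x) (g x))) = tmax (tsumL (l.map f)) (tsumL (l.map g)) := by
  induction l with
  | nil => simp [tsumL, tmax]
  | cons a l ih =>
    simp only [List.map_cons, tsumL_cons, ih]
    rw [tmax_assoc, tmax_left_comm (g a), ← tmax_assoc]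

theorem tsumL_map_none {α : Type} (l : List α) :
    tsumL (l.map (fun _ => (none : Option Int))) = none := by
  induction l with
  | nil => rfl
  | cons a l ih => rw [List.map_cons, tsumL_cons, ih]; rfl

theorem tsumL_swap {α β : Type} (l : List α) (m : List β) (f : α → β → Option Int) :
    tsumL (l.map (fun i => tsumL (m.map (f i))))
      = tsumL (m.map (fun k => tsumL (l.map (fun i => f i k)))) := by
  induction l with
  | nil =>
    rw [List.map_nil,
        show (fun k => tsumL (List.map (fun i => f i k) ([] : List α))) = (fun _ => (none : Option Int)) from rfl]
    exact (tsumL_map_none m).symm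
  | cons a l ih =>
    rw [List.map_cons, tsumL_cons, ih, ← tsumL_map_tmax]
    congr 1
    exact List.map_congr_left (fun k _ => (tsumL_cons _ _).symm)

theorem zip_vOf (g h : ℕ → Option Int) :
    (vOf g).zip (vOf h) = (List.range 6).map (fun k => (g k, h k)) := by
  simp [vOf, List.zip_map']

theorem tdot_vOf (g h : ℕ → Option Int) :
    tdot (vOf g) (vOf h) = tsumL ((List.range 6).map (fun k => tadd (g k) (h k))) := by
  rw [tdot_eq_tsumL, zip_vOf, List.map_map]
  rfl

theorem tcol_mOf (f : ℕ → ℕ → Option Int) (c : ℕ) (hc : c < 6) :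
    tcol (mOf f) c = vOf (fun k => f k c) := by
  simp only [tcol, mOf, vOf, List.map_map]
  refine List.map_congr_left (fun k _ => ?_)
  simp [List.getD, List.getElem?_map, List.getElem?_range hc]

theorem matmul_mOf (f : ℕ → ℕ → Option Int) (Q : List (List (Option Int))) :
    matmul (mOf f) Q = mOf (fun r c => tdot (vOf (f r)) (tcol Q c)) := by
  simp [matmul, mOf, vOf, List.map_map]

theorem vecmat_mOf (v : List (Option Int)) (q : ℕ → ℕ → Option Int) :
    vecmat v (mOf q) = vOf (fun c => tdot v (tcol (mOf q) c)) := rfl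

theorem vOf_congr (x y : ℕ → Option Int) (h : ∀ c, c < 6 → x c = y c) : vOf x = vOf y :=
  List.map_congr_left (fun c hc => h c (List.mem_range.mp hc))

-- tropical associativity: applying the vector to a product = applying it twice
theorem vec_assoc (g : ℕ → Option Int) (f q : ℕ → ℕ → Option Int) :
    vecmat (vOf g) (matmul (mOf f) (mOf q)) = vecmat (vecmat (vOf g) (mOf f)) (mOf q) := by
  rw [matmul_mOf, vecmat_mOf, vecmat_mOf, vecmat_mOf]
  refine vOf_congr _ _ (fun c hc6 => ?_)
  simp only [tcol_mOf _ c hc6]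
  have hL : tdot (vOf g) (vOf (fun k => tdot (vOf (f k)) (vOf (fun k' => q k' c))))
      = tsumL ((List.range 6).map (fun r =>
          tsumL ((List.range 6).map (fun k => tadd (g r) (tadd (f r k) (q k c)))))) := by
    rw [tdot_vOf]
    congr 1
    refine List.map_congr_left (fun r _ => ?_)
    rw [tdot_vOf, tadd_tsumL, List.map_map]
    rfl
  have hR : tdot (vOf (fun k => tdot (vOf g) (tcol (mOf f) k))) (vOf (fun k => q k c))
      = tsumL ((List.range 6).map (fun k =>
          tsumL ((List.range 6).map (fun r => tadd (g r) (tadd (f r k) (q k c)))))) := by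
    rw [tdot_vOf]
    congr 1
    refine List.map_congr_left (fun k hk => ?_)
    rw [tcol_mOf _ k (List.mem_range.mp hk), tdot_vOf, tsumL_tadd, List.map_map]
    congr 1
    refine List.map_congr_left (fun r _ => ?_)
    simp only [Function.comp]
    cases g r <;> cases f r k <;> cases q k c <;> simp [tadd, Int.add_assoc]
  rw [hL, hR, tsumL_swap]

-- ---- B-side lemmas: the window invariant ----

theorem tsumL_nil : tsumL ([] : List (Option Int)) = none := rfl

theorem ow_nonneg (A : List Int) (m : ℤ) (h : 0 ≤ m) : ow A m = some (best A m.toNat) := by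
  simp [ow, not_lt.mpr h]

-- proof-side view of stepMat's entry function
def stepf (a : Int) (r c : ℕ) : Option Int :=
  if c = 5 then some a else if c + 1 = r then some 0 else none

theorem stepMat_mOf (a : Int) : stepMat a = mOf (stepf a) := rfl

-- the last window slot after a step: the guarded six-way max is `best`
set_option maxHeartbeats 1600000 in
theorem B_inner (A : List Int) (t : ℕ) :
    tsumL ((List.range 6).map (fun k => tadd (W A t k) (some (A.getD (t + 1) 0))))
      = some (best A (t + 1)) := by
  rw [show (List.range 6) = [0, 1, 2, 3, 4, 5] from rfl, best]
  simp only [List.map_cons, List.map_nil]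
  by_cases ht : 5 ≤ t
  · rw [show W A t 0 = some (best A (t - 5)) from by
        simp only [W]; rw [ow_nonneg _ _ (by omega)]; congr 1; congr 1; omega,
      show W A t 1 = some (best A (t - 4)) from by
        simp only [W]; rw [ow_nonneg _ _ (by omega)]; congr 1; congr 1; omega,
      show W A t 2 = some (best A (t - 3)) from by
        simp only [W]; rw [ow_nonneg _ _ (by omega)]; congr 1; congr 1; omega,
      show W A t 3 = some (best A (t - 2)) from by
        simp only [W]; rw [ow_nonneg _ _ (by omega)]; congr 1; congr 1; omega,
      show W A t 4 = some (best A (t - 1)) from by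
        simp only [W]; rw [ow_nonneg _ _ (by omega)]; congr 1; congr 1; omega,
      show W A t 5 = some (best A t) from by
        simp only [W]; rw [ow_nonneg _ _ (by omega)]; congr 1; congr 1; omega]
    have h1 : ((t:ℤ) + 1 - 1 ≥ 0) := by omega
    have h2 : ((t:ℤ) + 1 - 2 ≥ 0) := by omega
    have h3 : ((t:ℤ) + 1 - 3 ≥ 0) := by omega
    have h4 : ((t:ℤ) + 1 - 4 ≥ 0) := by omega
    have h5 : ((t:ℤ) + 1 - 5 ≥ 0) := by omega
    have h6 : ((t:ℤ) + 1 - 6 ≥ 0) := by omega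
    simp only [if_pos h1, if_pos h2, if_pos h3, if_pos h4, if_pos h5, if_pos h6]
    rw [show t + 1 - 1 = t from by omega, show t + 1 - 2 = t - 1 from by omega,
        show t + 1 - 3 = t - 2 from by omega, show t + 1 - 4 = t - 3 from by omega,
        show t + 1 - 5 = t - 4 from by omega, show t + 1 - 6 = t - 5 from by omega]
    simp only [tsumL_cons, tsumL_nil, tmax, tadd, omax, max_def]
    split_ifs <;> (try simp only [Option.getD_some, Option.some.injEq]) <;> omega
  · interval_cases t <;>
      norm_num [W, ow, tsumL_cons, tsumL_nil, tmax, tadd, omax, tmax_none_right, max_def,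
        show Int.toNat 0 = 0 from rfl, show Int.toNat 1 = 1 from rfl, show Int.toNat 2 = 2 from rfl,
        show Int.toNat 3 = 3 from rfl, show Int.toNat 4 = 4 from rfl] <;>
      split_ifs <;> (try simp only [Option.getD_some, Option.some.injEq]) <;> omega

-- one matrix step moves the window one cell right
theorem step_window (A : List Int) (t : ℕ) :
    vecmat (vOf (W A t)) (stepMat (A.getD (t + 1) 0)) = vOf (W A (t + 1)) := by
  rw [stepMat_mOf, vecmat_mOf]
  refine vOf_congr _ _ (fun c hc => ?_)
  rw [tcol_mOf _ c hc, tdot_vOf]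
  interval_cases c
  · rw [show (List.range 6) = [0, 1, 2, 3, 4, 5] from rfl]
    norm_num [stepf, tsumL_cons, tsumL_nil, tadd_none_right, tadd_some_zero,
      tmax_none_right, tmax_none_left]
    simp only [W]; congr 1; omega
  · rw [show (List.range 6) = [0, 1, 2, 3, 4, 5] from rfl]
    norm_num [stepf, tsumL_cons, tsumL_nil, tadd_none_right, tadd_some_zero,
      tmax_none_right, tmax_none_left]
    simp only [W]; congr 1; omega
  · rw [show (List.range 6) = [0, 1, 2, 3, 4, 5] from rfl]
    norm_num [stepf, tsumL_cons, tsumL_nil, tadd_none_right, tadd_some_zero,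
      tmax_none_right, tmax_none_left]
    simp only [W]; congr 1; omega
  · rw [show (List.range 6) = [0, 1, 2, 3, 4, 5] from rfl]
    norm_num [stepf, tsumL_cons, tsumL_nil, tadd_none_right, tadd_some_zero,
      tmax_none_right, tmax_none_left]
    simp only [W]; congr 1; omega
  · rw [show (List.range 6) = [0, 1, 2, 3, 4, 5] from rfl]
    norm_num [stepf, tsumL_cons, tsumL_nil, tadd_none_right, tadd_some_zero,
      tmax_none_right, tmax_none_left]
    simp only [W]; congr 1; omega
  · have hcond : ∀ k : ℕ, stepf (A.getD (t + 1) 0) k 5 = some (A.getD (t + 1) 0) := by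
      intro k; simp [stepf]
    simp only [hcond]
    rw [B_inner]
    simp only [W]
    rw [ow_nonneg _ _ (by omega)]
    congr 1
    congr 1
    omega

-- the whole loop: the accumulated product applied to the start vector is the window
theorem B_fold (A : List Int) : ∀ t, t + 1 ≤ A.length →
    ∃ f, ((A.drop 1).take t).foldl (fun P a => matmul P (stepMat a)) identMat = mOf f
       ∧ vecmat (vOf (fun k => if k = 5 then some (A.getD 0 0) else none)) (mOf f)
           = vOf (W A t) := by
  intro t
  induction t with
  | zero =>
    intro h
    refine ⟨fun r c => if r = c then some 0 else none, rfl, ?_⟩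
    rw [vecmat_mOf]
    refine vOf_congr _ _ (fun c hc => ?_)
    rw [tcol_mOf _ c hc, tdot_vOf, show (List.range 6) = [0, 1, 2, 3, 4, 5] from rfl]
    interval_cases c <;>
      norm_num [W, ow, best, List.getD, tsumL_cons, tsumL_nil, tadd, tmax,
        tmax_none_right, tmax_none_left]
  | succ t ih =>
    intro h
    obtain ⟨f, hf, hv⟩ := ih (by omega)
    have hl : (A.drop 1).take (t + 1) = (A.drop 1).take t ++ [A.getD (t + 1) 0] := by
      rw [List.take_add_one]
      congr 1
      rw [List.getElem?_drop, List.getElem?_eq_getElem (by omega)]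
      simp [List.getD, List.getElem?_eq_getElem (show t + 1 < A.length from by omega),
        Nat.add_comm]
    rw [hl, List.foldl_append, hf]
    simp only [List.foldl_cons, List.foldl_nil]
    rw [stepMat_mOf, matmul_mOf]
    refine ⟨_, rfl, ?_⟩
    rw [← matmul_mOf, ← stepMat_mOf, stepMat_mOf, vec_assoc, hv, ← stepMat_mOf, step_window]

theorem solution_alt_eq_best (A : List Int) (hA : A ≠ []) :
    solution_alt A = best A (A.length - 1) := by
  have hn : 0 < A.length := List.length_pos_of_ne_nil hA
  obtain ⟨f, hf, hv⟩ := B_fold A (A.length - 1) (by omega)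
  unfold solution_alt
  dsimp only
  have htake : (A.drop 1).take (A.length - 1) = A.drop 1 :=
    List.take_of_length_le (by simp)
  rw [← htake, hf]
  have hstart : ([none, none, none, none, none,
      some ((PySem.List.pyGet? A 0).getD 0)] : List (Option Int))
      = vOf (fun k => if k = 5 then some (A.getD 0 0) else none) := by
    have h0 : (PySem.List.pyGet? A 0).getD 0 = A.getD 0 0 := by
      cases A with
      | nil => exact absurd rfl hA
      | cons h tl => simp [PySem.List.pyGet?, PySem.List.pyIdx?, List.getD]
    rw [h0]; rfl
  rw [hstart, hv]
  rw [show (vOf (W A (A.length - 1))).getD 5 none = W A (A.length - 1) 5 from rfl]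
  simp only [W]
  rw [show ((A.length - 1 : ℕ) : ℤ) - 5 + ((5 : ℕ) : ℤ) = ((A.length - 1 : ℕ) : ℤ) from by
    push_cast; ring]
  rw [ow_nonneg _ _ (by omega)]
  simp

-- ===== VERDICT (by name: the statement is the Claim_ definition above) =====
theorem solution_spec : Claim_equal_solution := by
  intro A _ hpre
  unfold Spec_solution
  rw [solution_eq_best A, solution_alt_eq_best A hpre]
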